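-- pv_equiv track=rewrite | github.com/per1gyom/couffrant-assistant | app/routes/raya_helpers.py | _strip_action_tags
-- ===== SOURCE A (Python) =====
-- def _strip_action_tags(text: str) -> str:
--     """Retire les tags [ACTION:...] en gérant les crochets imbriqués (domaines Odoo, JSON)."""
--     result = []
--     i = 0
--     n = len(text)
--     while i < n:
--         # Détecter le début d'un tag ACTION (avec ou sans backtick)
--         rest = text[i:]
--         if rest.startswith('[ACTION:') or rest.startswith('`[ACTION:'):
--             skip_bt = 1 if text[i] == '`' else 0
--             j = i + skip_bt
--             depth = 0
--             while j < n:
--                 if text[j] == '[':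
--                     depth += 1
--                 elif text[j] == ']':
--                     depth -= 1
--                     if depth == 0:
--                         j += 1
--                         break
--                 j += 1
--             # Skip backtick fermant
--             if j < n and text[j] == '`':
--                 j += 1
--             i = j
--         else:
--             result.append(text[i])
--             i += 1
--     return ''.join(result)
-- ===== SOURCE B (Python) =====
-- def _strip_action_tags(text: str) -> str:
--     """Retire les tags [ACTION:...] via un automate a un seul passage (etat: hors tag / profondeur de crochets)."""
--     out = []
--     n = len(text)
--     i = 0
--     depth = None  # None = copying; int = bracket depth inside a tag
--     while i < n:
--         ch = text[i]
--         if depth is None: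
--             if ch == '[' and text[i + 1:i + 8] == 'ACTION:':
--                 depth = 1
--             elif ch == '`' and text[i + 1:i + 9] == '[ACTION:':
--                 depth = 0
--             else:
--                 out.append(ch)
--         elif ch == '[':
--             depth += 1
--         elif ch == ']':
--             depth -= 1
--             if depth == 0:
--                 depth = None
--                 if i + 1 < n and text[i + 1] == '`':
--                     i += 1
--         i += 1
--     return ''.join(out)
-- ===== Notes on version B (the rewrite author's own statement) =====
-- stated objective: faster
-- what changed: B replaces A's nested loops (an outer walk that slices the whole remaining suffix and runs startswith at every position, plus an inner depth loop) by a single flat state-machine pass whose state is either copy mode or the current bracket depth; the tag-opener test is a constant-length slice comparison done only where a tag could begin.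
import Mathlib
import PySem

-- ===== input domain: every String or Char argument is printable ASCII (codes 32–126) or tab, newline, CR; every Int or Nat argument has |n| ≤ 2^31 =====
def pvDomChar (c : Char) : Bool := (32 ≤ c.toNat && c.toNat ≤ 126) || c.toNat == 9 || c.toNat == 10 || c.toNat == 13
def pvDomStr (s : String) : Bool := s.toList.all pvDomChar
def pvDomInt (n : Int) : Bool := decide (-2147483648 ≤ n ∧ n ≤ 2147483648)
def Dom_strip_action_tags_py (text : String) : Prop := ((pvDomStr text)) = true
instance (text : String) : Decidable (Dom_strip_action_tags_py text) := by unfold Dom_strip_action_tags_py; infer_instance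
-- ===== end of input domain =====

-- B replaces A's nested loops (outer per-position walk with rest = text[i:] and startswith, inner depth loop)
-- by one flat single-pass state machine whose state is 'copying' (none) or the current bracket depth; objective: faster.

-- ===== PORT A =====
def pvPat : List Char := ['[', 'A', 'C', 'T', 'I', 'O', 'N', ':']

-- A's inner depth loop:
-- while j < n: '[' → depth += 1; ']' → depth -= 1, break past it when depth hits 0
def pvDropTag : List Char → Int → List Char
  | [], _ => []
  | c :: rest, depth =>
      if c = '[' then pvDropTag rest (depth + 1)
      else if c = ']' then
        if depth - 1 = 0 then rest else pvDropTag rest (depth - 1)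
      else pvDropTag rest depth

-- A's "if j < n and text[j] == '`': j += 1"
def pvSkipBT : List Char → List Char
  | '`' :: rest => rest
  | rest => rest

theorem pvDropTag_length_le (l : List Char) (d : Int) : (pvDropTag l d).length ≤ l.length := by
  induction l generalizing d with
  | nil => simp [pvDropTag]
  | cons c rest ih =>
      simp only [pvDropTag]
      split_ifs
      · exact Nat.le_trans (ih _) (Nat.le_succ _)
      · exact Nat.le_succ _
      · exact Nat.le_trans (ih _) (Nat.le_succ _)
      · exact Nat.le_trans (ih _) (Nat.le_succ _)

theorem pvSkipBT_length_le (l : List Char) : (pvSkipBT l).length ≤ l.length := by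
  unfold pvSkipBT
  split
  · simp
  · exact le_rfl

-- used by the termination proof of A's outer loop
theorem pvTag_shrink (l : List Char) (h : pvPat.isPrefixOf l = true) :
    (pvSkipBT (pvDropTag l 0)).length < l.length := by
  rw [List.isPrefixOf_iff_prefix] at h
  obtain ⟨t, ht⟩ := h
  have hl : l = '[' :: (['A','C','T','I','O','N',':'] ++ t) := by
    rw [← ht]; rfl
  subst hl
  have h1 : pvDropTag ('[' :: (['A','C','T','I','O','N',':'] ++ t)) 0
      = pvDropTag (['A','C','T','I','O','N',':'] ++ t) 1 := by
    simp [pvDropTag]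
  calc (pvSkipBT (pvDropTag ('[' :: (['A','C','T','I','O','N',':'] ++ t)) 0)).length
      ≤ (pvDropTag ('[' :: (['A','C','T','I','O','N',':'] ++ t)) 0).length := pvSkipBT_length_le _
    _ ≤ (['A','C','T','I','O','N',':'] ++ t).length := by rw [h1]; exact pvDropTag_length_le _ _
    _ < ('[' :: (['A','C','T','I','O','N',':'] ++ t)).length := by simp

-- A's outer while loop over the remaining suffix text[i:], one character at a time
def pvStripA : List Char → List Char
  | [] => []
  | c :: rest =>
      if pvPat.isPrefixOf (c :: rest) then
        pvStripA (pvSkipBT (pvDropTag (c :: rest) 0))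
      else if ('`' :: pvPat).isPrefixOf (c :: rest) then
        pvStripA (pvSkipBT (pvDropTag rest 0))
      else
        c :: pvStripA rest
termination_by l => l.length
decreasing_by
  · exact pvTag_shrink _ ‹_›
  · calc (pvSkipBT (pvDropTag rest 0)).length
        ≤ (pvDropTag rest 0).length := pvSkipBT_length_le _
      _ ≤ rest.length := pvDropTag_length_le _ _
      _ < (c :: rest).length := by simp
  · simp

def strip_action_tags_py (text : String) : String := String.ofList (pvStripA text.toList)

-- ===== PORT B =====
-- Source B's single while loop as a recursion over the remaining characters; the second
-- argument is Source B's `depth` variable: none = copying, some d = inside a tag at depth d.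
-- The close branch's peek `match rest with '`' :: r2 …` is Source B's
-- "if i + 1 < n and text[i+1] == '`': i += 1".
def pvB : List Char → Option Int → List Char
  | [], _ => []
  | c :: rest, none =>
      if c = '[' ∧ rest.take 7 = ['A','C','T','I','O','N',':'] then pvB rest (some 1)
      else if c = '`' ∧ rest.take 8 = ['[','A','C','T','I','O','N',':'] then pvB rest (some 0)
      else c :: pvB rest none
  | c :: rest, some d =>
      if c = '[' then pvB rest (some (d + 1))
      else if c = ']' then
        if d - 1 = 0 then
          -- Source B: "if i + 1 < n and text[i+1] == '`': i += 1"
          if rest.head? = some '`' then pvB rest.tail none else pvB rest none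
        else pvB rest (some (d - 1))
      else pvB rest (some d)
termination_by l _ => l.length
decreasing_by all_goals simp

def strip_action_tags_py_alt (text : String) : String := String.ofList (pvB text.toList none)

-- ===== PRECONDITION & SPEC =====
def Spec_strip_action_tags_py (text : String) (out : String) : Prop := out = strip_action_tags_py_alt text
instance (text : String) (out : String) : Decidable (Spec_strip_action_tags_py text out) := by unfold Spec_strip_action_tags_py; infer_instance

-- ===== CLAIM (what is proved, stated in full; the proofs are below) =====
def Claim_equal_strip_action_tags_py : Prop := ∀ (text : String), Dom_strip_action_tags_py text → Spec_strip_action_tags_py text (strip_action_tags_py text)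

-- ===== LEMMAS AND PROOFS =====
-- bridge: A's startswith('[ACTION:') test ↔ B's character-plus-slice test
theorem pvPrefix8 (c : Char) (rest : List Char) :
    pvPat.isPrefixOf (c :: rest) = true ↔
      (c = '[' ∧ rest.take 7 = ['A','C','T','I','O','N',':']) := by
  rw [List.isPrefixOf_iff_prefix, List.prefix_iff_eq_take]
  simp [pvPat, List.take_succ_cons, eq_comm]

theorem pvPrefix9 (c : Char) (rest : List Char) :
    ('`' :: pvPat).isPrefixOf (c :: rest) = true ↔
      (c = '`' ∧ rest.take 8 = ['[','A','C','T','I','O','N',':']) := by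
  rw [List.isPrefixOf_iff_prefix, List.prefix_iff_eq_take]
  simp [pvPat, List.take_succ_cons, eq_comm]

theorem pvB_nil (st : Option Int) : pvB [] st = [] := by rw [pvB.eq_def]

theorem pvB_cons_none (c : Char) (rest : List Char) :
    pvB (c :: rest) none =
      (if c = '[' ∧ rest.take 7 = ['A','C','T','I','O','N',':'] then pvB rest (some 1)
       else if c = '`' ∧ rest.take 8 = ['[','A','C','T','I','O','N',':'] then pvB rest (some 0)
       else c :: pvB rest none) := by rw [pvB.eq_def]

theorem pvB_cons_some (c : Char) (rest : List Char) (d : Int) :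
    pvB (c :: rest) (some d) =
      (if c = '[' then pvB rest (some (d + 1))
       else if c = ']' then
         if d - 1 = 0 then
           if rest.head? = some '`' then pvB rest.tail none else pvB rest none
         else pvB rest (some (d - 1))
       else pvB rest (some d)) := by rw [pvB.eq_def]

-- B's tag mode simulates A's inner depth loop followed by the backtick skip
theorem pvB_tag (l : List Char) (d : Int) :
    pvB l (some d) = pvB (pvSkipBT (pvDropTag l d)) none := by
  induction l generalizing d with
  | nil => simp [pvB_nil, pvDropTag, pvSkipBT]
  | cons c rest ih =>
      rw [pvB_cons_some, pvDropTag]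
      by_cases h1 : c = '['
      · rw [if_pos h1, if_pos h1, ih]
      · rw [if_neg h1, if_neg h1]
        by_cases h2 : c = ']'
        · rw [if_pos h2, if_pos h2]
          by_cases h3 : d - 1 = 0
          · rw [if_pos h3, if_pos h3]
            cases rest with
            | nil => simp [pvSkipBT]
            | cons r rs =>
                by_cases hr : r = '`'
                · subst hr; simp [pvSkipBT]
                · rw [if_neg (by simpa using hr), pvSkipBT.eq_def]
                  split
                  · rename_i heq; rw [List.cons.injEq] at heq; exact absurd heq.1 hr
                  · rfl
          · rw [if_neg h3, if_neg h3, ih]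
        · rw [if_neg h2, if_neg h2, ih]

theorem pvAB (n : Nat) : ∀ cs : List Char, cs.length ≤ n → pvStripA cs = pvB cs none := by
  induction n with
  | zero =>
      intro cs hlen
      have : cs = [] := List.length_eq_zero_iff.mp (Nat.le_zero.mp hlen)
      subst this; rw [pvStripA, pvB]
  | succ n ih =>
      intro cs hlen
      cases cs with
      | nil => rw [pvStripA, pvB_nil]
      | cons c rest =>
          have hrest : rest.length ≤ n := by simpa using hlen
          rw [pvStripA, pvB_cons_none]
          by_cases h1 : pvPat.isPrefixOf (c :: rest) = true
          · obtain ⟨hc, ht⟩ := (pvPrefix8 c rest).mp h1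
            rw [if_pos h1, if_pos ⟨hc, ht⟩, pvB_tag]
            have hdrop : pvDropTag (c :: rest) 0 = pvDropTag rest 1 := by
              rw [pvDropTag, if_pos hc]; norm_num
            rw [hdrop]
            exact ih _ (le_trans (le_trans (pvSkipBT_length_le _) (pvDropTag_length_le _ _)) hrest)
          · rw [if_neg h1]
            have hb1 : ¬ (c = '[' ∧ rest.take 7 = ['A','C','T','I','O','N',':']) :=
              fun h => h1 ((pvPrefix8 c rest).mpr h)
            rw [if_neg hb1]
            by_cases h2 : ('`' :: pvPat).isPrefixOf (c :: rest) = true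
            · obtain ⟨hc, ht⟩ := (pvPrefix9 c rest).mp h2
              rw [if_pos h2, if_pos ⟨hc, ht⟩, pvB_tag]
              exact ih _ (le_trans (le_trans (pvSkipBT_length_le _) (pvDropTag_length_le _ _)) hrest)
            · have hb2 : ¬ (c = '`' ∧ rest.take 8 = ['[','A','C','T','I','O','N',':']) :=
                fun h => h2 ((pvPrefix9 c rest).mpr h)
              rw [if_neg h2, if_neg hb2, ih rest hrest]

-- ===== VERDICT (by name: the statement is the Claim_ definition above) =====
theorem strip_action_tags_py_spec : Claim_equal_strip_action_tags_py := by
  intro text _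
  unfold Spec_strip_action_tags_py strip_action_tags_py strip_action_tags_py_alt
  rw [pvAB text.toList.length text.toList le_rfl]
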